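-- pv_equiv track=rewrite | github.com/AILabs-official/aws-kdp | scripts/build_sudoku_book.py | count_hint_pages
-- ===== SOURCE A (Python) =====
-- HINT_SLOTS_PER_PAGE = 38  # constant — both rendering & TOC math use this
--
-- def _hint_items(puzzles: list[dict]) -> list[dict]:
--     """Build the ordered list of items to render in a hint section.
--
--     Section headers are inserted between difficulty groups so the reader sees
--     "── Warm-Up Puzzles (6×6) ──" before the warmup hint lines, etc.
--     """
--     DIFF_ORDER = ["warmup", "easy", "medium", "hard", "expert"]
--     DIFF_LABEL_HINTS = {
--         "warmup": "Warm-Up Puzzles  (6×6)",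
--         "easy":   "Easy Puzzles",
--         "medium": "Medium Puzzles",
--         "hard":   "Hard Puzzles",
--         "expert": "Expert Puzzles",
--     }
--     by_diff: dict[str, list[dict]] = {d: [] for d in DIFF_ORDER}
--     for puz in puzzles:
--         by_diff.setdefault(puz.get("difficulty", "medium"), []).append(puz)
--
--     items: list[dict] = []
--     for d in DIFF_ORDER:
--         group = by_diff.get(d, [])
--         if not group:
--             continue
--         items.append({
--             "type": "section",
--             "label": DIFF_LABEL_HINTS[d],
--             "count": len(group),
--             "difficulty": d,
--         })
--         for puz in group:
--             items.append({"type": "puzzle", "puzzle": puz})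
--     return items
--
-- def _slot_cost(item: dict) -> int:
--     return 2 if item["type"] == "section" else 1
--
-- def count_hint_pages(puzzles: list[dict]) -> int:
--     """Mirror the page-break logic of build_hint_pages WITHOUT rendering.
--
--     Uses identical slot accounting so TOC entries built upfront stay
--     accurate. A section header must always be followed by at least one
--     puzzle line on the same page (no orphaned headers).
--     """
--     items = _hint_items(puzzles)
--     n_pages = 0
--     i = 0
--     while i < len(items):
--         n_pages += 1
--         slots = 0
--         while i < len(items):
--             cost = _slot_cost(items[i])
--             if slots + cost > HINT_SLOTS_PER_PAGE:
--                 break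
--             # Don't leave a section header as the last thing on a page
--             if (items[i]["type"] == "section"
--                     and slots + cost + 1 > HINT_SLOTS_PER_PAGE):
--                 break
--             slots += cost
--             i += 1
--     return n_pages
-- ===== SOURCE B (Python) =====
-- HINT_SLOTS_PER_PAGE = 38
--
--
-- def count_hint_pages(puzzles: list[dict]) -> int:
--     """Single streaming pass: pack difficulty groups (header = 2 slots, kept
--     with at least one puzzle line; puzzle = 1 slot) without building an
--     intermediate item list."""
--     DIFF_ORDER = ["warmup", "easy", "medium", "hard", "expert"]
--     n_pages = 0
--     slots = None  # None = no page open yet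
--     for d in DIFF_ORDER:
--         group = [p for p in puzzles if p.get("difficulty", "medium") == d]
--         if not group:
--             continue
--         # section header (2 slots) must leave room for one puzzle line
--         if slots is None or slots + 3 > HINT_SLOTS_PER_PAGE:
--             n_pages += 1
--             slots = 0
--         slots += 2
--         for _p in group:
--             if slots + 1 > HINT_SLOTS_PER_PAGE:
--                 n_pages += 1
--                 slots = 0
--             slots += 1
--     return n_pages
-- ===== Notes on version B (the rewrite author's own statement) =====
-- stated objective: simpler
-- what changed: Replaces the build-items-list-then-index-walk two-phase packer (helper building section/puzzle dicts, then nested while loops over indices) with one streaming pass that filters each difficulty group and updates a (pages, slots) accumulator directly.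
import Mathlib
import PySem

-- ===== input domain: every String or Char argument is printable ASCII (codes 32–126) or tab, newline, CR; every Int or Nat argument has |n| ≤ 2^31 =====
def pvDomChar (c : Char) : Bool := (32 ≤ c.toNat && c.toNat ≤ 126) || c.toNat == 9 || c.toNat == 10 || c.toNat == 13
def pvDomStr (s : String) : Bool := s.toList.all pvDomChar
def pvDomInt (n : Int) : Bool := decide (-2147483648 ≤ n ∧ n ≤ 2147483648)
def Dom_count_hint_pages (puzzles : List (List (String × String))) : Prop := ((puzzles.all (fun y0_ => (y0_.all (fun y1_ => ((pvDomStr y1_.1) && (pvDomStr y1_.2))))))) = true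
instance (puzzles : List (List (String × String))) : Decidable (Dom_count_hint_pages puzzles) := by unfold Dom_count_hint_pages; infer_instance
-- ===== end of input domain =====

-- B replaces A's two-phase packer (build an items list, then walk it with nested
-- index loops) by one streaming pass over the difficulty groups; same cost.

-- shared primitive: puz.get(key, dflt) on a Python dict ported as an assoc list (first match)
def pvGet (p : List (String × String)) (k dflt : String) : String :=
  match p.find? (fun kv => kv.1 == k) with
  | some kv => kv.2
  | none => dflt

def pvDiffOrder : List String := ["warmup", "easy", "medium", "hard", "expert"]

-- ===== PORT A =====

-- an entry of A's `items` list (only the fields A ever builds)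
inductive HintItem where
  | sec (label : String) (count : Int) (difficulty : String)
  | puzzle (p : List (String × String))
deriving DecidableEq, Repr

-- _slot_cost
def hintSlotCost (it : HintItem) : Int :=
  match it with
  | .sec _ _ _ => 2
  | .puzzle _ => 1

def hintIsSection (it : HintItem) : Bool :=
  match it with
  | .sec _ _ _ => true
  | .puzzle _ => false

-- _hint_items
def hintItems (puzzles : List (List (String × String))) : List HintItem :=
  let labels : PySem.Dict String String := PySem.Dict.ofList
    [("warmup", "Warm-Up Puzzles  (6×6)"), ("easy", "Easy Puzzles"),
     ("medium", "Medium Puzzles"), ("hard", "Hard Puzzles"), ("expert", "Expert Puzzles")]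
  let byDiff : PySem.Dict String (List (List (String × String))) :=
    pvDiffOrder.foldl (fun d k => d.insert k []) PySem.Dict.empty
  -- by_diff.setdefault(key, []).append(puz)  ==  modify key [] (· ++ [puz])
  let byDiff := puzzles.foldl (fun d p => d.modify (pvGet p "difficulty" "medium") [] (· ++ [p])) byDiff
  pvDiffOrder.foldl (fun items d =>
    let group := byDiff.getD d []
    if group = [] then items
    else group.foldl (fun its p => its ++ [HintItem.puzzle p])
      -- DIFF_LABEL_HINTS[d]: every d of pvDiffOrder is a key of labels, so getD is exact here
      (items ++ [HintItem.sec (labels.getD d "") (group.length : Int) d])) []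

-- the inner `while` loop of A: returns (remaining items, final slots)
def innerA : List HintItem → Int → List HintItem × Int
  | [], slots => ([], slots)
  | it :: rest, slots =>
    let cost := hintSlotCost it
    if 38 < slots + cost then (it :: rest, slots)
    else if hintIsSection it = true ∧ 38 < slots + cost + 1 then (it :: rest, slots)
    else innerA rest (slots + cost)

theorem innerA_fst_length : ∀ (l : List HintItem) (s : Int), (innerA l s).1.length ≤ l.length := by
  intro l
  induction l with
  | nil => intro s; simp [innerA]
  | cons it rest ih =>
    intro s
    simp only [innerA]
    split
    · simp
    · split
      · simp
      · exact le_trans (ih _) (by simp)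

theorem innerA_cons_zero (it : HintItem) (rest : List HintItem) :
    innerA (it :: rest) 0 = innerA rest (hintSlotCost it) := by
  cases it <;> simp [innerA, hintIsSection, hintSlotCost]

-- the outer `while` loop of A
def pageLoopA : List HintItem → Int
  | [] => 0
  | it :: rest => 1 + pageLoopA (innerA (it :: rest) 0).1
termination_by l => l.length
decreasing_by
  rw [innerA_cons_zero]
  have := innerA_fst_length rest (hintSlotCost it)
  simp only [List.length_cons]
  omega

def count_hint_pages (puzzles : List (List (String × String))) : Int :=
  pageLoopA (hintItems puzzles)

-- ===== PORT B =====
def count_hint_pages_alt (puzzles : List (List (String × String))) : Int :=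
  (pvDiffOrder.foldl (fun (st : Int × Option Int) d =>
    let group := puzzles.filter (fun p => pvGet p "difficulty" "medium" == d)
    if group = [] then st
    else
      let st1 : Int × Int :=
        match st with
        | (n, none) => (n + 1, 0)
        | (n, some s) => if 38 < s + 3 then (n + 1, 0) else (n, s)
      let st2 : Int × Int := (st1.1, st1.2 + 2)
      let st3 := group.foldl (fun (q : Int × Int) _ =>
        if 38 < q.2 + 1 then (q.1 + 1, 1) else (q.1, q.2 + 1)) st2
      (st3.1, some st3.2)) ((0 : Int), (none : Option Int))).1

-- ===== PRECONDITION & SPEC =====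
def Spec_count_hint_pages (puzzles : List (List (String × String))) (out : Int) : Prop := out = count_hint_pages_alt puzzles
instance (puzzles : List (List (String × String))) (out : Int) : Decidable (Spec_count_hint_pages puzzles out) := by unfold Spec_count_hint_pages; infer_instance

-- ===== CLAIM (what is proved, stated in full; the proofs are below) =====
def Claim_equal_count_hint_pages : Prop := ∀ (puzzles : List (List (String × String))), Dom_count_hint_pages puzzles → Spec_count_hint_pages puzzles (count_hint_pages puzzles)

-- ===== LEMMAS AND PROOFS =====

-- token-level step of B's streaming pass (proof-side bridge)
def streamStep (st : Int × Option Int) (it : HintItem) : Int × Option Int :=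
  let cost := hintSlotCost it
  match st with
  | (n, none) => (n + 1, some cost)
  | (n, some s) =>
    if 38 < s + cost then (n + 1, some cost)
    else if hintIsSection it = true ∧ 38 < s + cost + 1 then (n + 1, some cost)
    else (n, some (s + cost))

-- the per-difficulty segment of A's items list
def seg (puzzles : List (List (String × String))) (label : String) (d : String) : List HintItem :=
  let g := puzzles.filter (fun p => pvGet p "difficulty" "medium" == d)
  if g = [] then [] else HintItem.sec label (g.length : Int) d :: g.map HintItem.puzzle

-- proof-side copy of A's label dict (values are irrelevant to the count, but kept exact)
def pvLabels : PySem.Dict String String := PySem.Dict.ofList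
  [("warmup", "Warm-Up Puzzles  (6×6)"), ("easy", "Easy Puzzles"),
   ("medium", "Medium Puzzles"), ("hard", "Hard Puzzles"), ("expert", "Expert Puzzles")]

theorem hintSlotCost_pos (it : HintItem) : 0 < hintSlotCost it := by
  cases it <;> simp [hintSlotCost]

theorem foldl_stream_inner : ∀ (l : List HintItem) (n s : Int),
    List.foldl streamStep (n, some s) l
      = List.foldl streamStep (n, some (innerA l s).2) (innerA l s).1 := by
  intro l
  induction l with
  | nil => intro n s; simp [innerA]
  | cons it rest ih =>
    intro n s
    simp only [innerA]
    split
    · rfl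
    · split
      · rfl
      · rename_i h1 h2
        have hstep : streamStep (n, some s) it = (n, some (s + hintSlotCost it)) := by
          simp only [streamStep]
          rw [if_neg h1, if_neg h2]
        simp only [List.foldl_cons, hstep]
        exact ih n (s + hintSlotCost it)

theorem innerA_break : ∀ (l : List HintItem) (s : Int),
    (innerA l s).1 = [] ∨ ∃ it rest, (innerA l s).1 = it :: rest ∧
      (38 < (innerA l s).2 + hintSlotCost it ∨
        (hintIsSection it = true ∧ 38 < (innerA l s).2 + hintSlotCost it + 1)) := by
  intro l
  induction l with
  | nil => intro s; left; simp [innerA]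
  | cons it rest ih =>
    intro s
    simp only [innerA]
    split
    · rename_i h1; right; exact ⟨it, rest, rfl, Or.inl h1⟩
    · split
      · rename_i h2; right; exact ⟨it, rest, rfl, Or.inr h2⟩
      · exact ih _

theorem stream_page : ∀ (N : ℕ) (l : List HintItem), l.length ≤ N → ∀ (n s : Int), 0 ≤ s →
    (List.foldl streamStep (n, some s) l).1 = n + pageLoopA (innerA l s).1 := by
  intro N
  induction N with
  | zero =>
    intro l hl n s hs
    have : l = [] := List.eq_nil_of_length_eq_zero (Nat.le_zero.mp hl)
    subst this
    simp [innerA, pageLoopA]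
  | succ N ih =>
    intro l hl n s hs
    rw [foldl_stream_inner]
    rcases innerA_break l s with h | ⟨it, rest, h, hbrk⟩
    · rw [h]; simp [pageLoopA]
    · rw [h]
      have hbump : streamStep (n, some (innerA l s).2) it = (n + 1, some (hintSlotCost it)) := by
        simp only [streamStep]
        rcases hbrk with h1 | h2
        · rw [if_pos h1]
        · by_cases h1 : 38 < (innerA l s).2 + hintSlotCost it
          · rw [if_pos h1]
          · rw [if_neg h1, if_pos h2]
      have hlen : rest.length ≤ N := by
        have h2 := innerA_fst_length l s
        rw [h] at h2
        simp only [List.length_cons] at h2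
        omega
      simp only [List.foldl_cons, hbump]
      rw [ih rest hlen (n + 1) (hintSlotCost it) (le_of_lt (hintSlotCost_pos it))]
      conv_rhs => rw [pageLoopA]
      rw [innerA_cons_zero]
      ring

theorem stream_none : ∀ (l : List HintItem) (n : Int),
    (List.foldl streamStep (n, none) l).1 = n + pageLoopA l := by
  intro l n
  cases l with
  | nil => simp [pageLoopA]
  | cons it rest =>
    have hstep : streamStep (n, none) it = (n + 1, some (hintSlotCost it)) := by
      simp [streamStep]
    simp only [List.foldl_cons, hstep]
    rw [stream_page rest.length rest le_rfl (n + 1) _ (le_of_lt (hintSlotCost_pos it))]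
    conv_rhs => rw [pageLoopA]
    rw [innerA_cons_zero]
    ring

-- ==== items-list characterisation ====

theorem dict_init_getD (c : String) :
    ((pvDiffOrder.foldl (fun d k => d.insert k ([] : List (List (String × String)))) PySem.Dict.empty)).getD c [] = [] := by
  simp only [pvDiffOrder, List.foldl_cons, List.foldl_nil]
  simp only [PySem.Dict.getD_insert]
  split_ifs <;> simp [PySem.Dict.getD_empty]

theorem dict_fold_getD : ∀ (ps : List (List (String × String)))
    (d : PySem.Dict String (List (List (String × String)))) (c : String),
    (ps.foldl (fun d p => d.modify (pvGet p "difficulty" "medium") [] (fun l => l ++ [p])) d).getD c []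
      = d.getD c [] ++ ps.filter (fun p => pvGet p "difficulty" "medium" == c) := by
  intro ps
  induction ps with
  | nil => intro d c; simp
  | cons p ps ih =>
    intro d c
    simp only [List.foldl_cons, List.filter_cons]
    rw [ih]
    rw [PySem.Dict.getD_modify]
    by_cases h : c = pvGet p "difficulty" "medium"
    · rw [if_pos h]
      have hb : (pvGet p "difficulty" "medium" == c) = true := by simp [h]
      rw [hb]
      simp [h]
    · rw [if_neg h]
      have : (pvGet p "difficulty" "medium" == c) = false := by
        simp [beq_eq_false_iff_ne]
        exact fun hc => h hc.symm
      simp [this]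

theorem foldl_append_puzzle : ∀ (g : List (List (String × String))) (acc : List HintItem),
    g.foldl (fun its p => its ++ [HintItem.puzzle p]) acc = acc ++ g.map HintItem.puzzle := by
  intro g
  induction g with
  | nil => intro acc; simp
  | cons p g ih => intro acc; simp [ih]

theorem foldl_seg (G : String → List (List (String × String))) (lab : String → String) :
    ∀ (L : List String) (acc : List HintItem),
    L.foldl (fun items d =>
        let group := G d
        if group = [] then items
        else group.foldl (fun its p => its ++ [HintItem.puzzle p])
          (items ++ [HintItem.sec (lab d) (group.length : Int) d])) acc
      = acc ++ L.flatMap (fun d =>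
          if G d = [] then []
          else HintItem.sec (lab d) ((G d).length : Int) d :: (G d).map HintItem.puzzle) := by
  intro L
  induction L with
  | nil => intro acc; simp
  | cons d L ih =>
    intro acc
    simp only [List.foldl_cons, List.flatMap_cons]
    by_cases h : G d = []
    · simp only [h]
      rw [ih]
      simp
    · simp only [if_neg h]
      rw [foldl_append_puzzle, ih]
      simp

theorem hintItems_eq (puzzles : List (List (String × String))) :
    hintItems puzzles = pvDiffOrder.flatMap (fun d => seg puzzles (pvLabels.getD d "") d) := by
  unfold hintItems
  rw [foldl_seg]
  simp only [List.nil_append]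
  congr 1
  funext d
  unfold seg
  rw [dict_fold_getD, dict_init_getD]
  simp only [List.nil_append]
  rfl

-- ==== B's group step = token-level stream over a segment ====

theorem stream_puzzles : ∀ (g : List (List (String × String))) (n s : Int),
    List.foldl streamStep (n, some s) (g.map HintItem.puzzle)
      = ((g.foldl (fun (q : Int × Int) _ =>
            if 38 < q.2 + 1 then (q.1 + 1, 1) else (q.1, q.2 + 1)) (n, s)).1,
         some (g.foldl (fun (q : Int × Int) _ =>
            if 38 < q.2 + 1 then (q.1 + 1, 1) else (q.1, q.2 + 1)) (n, s)).2) := by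
  intro g
  induction g with
  | nil => intro n s; simp
  | cons p g ih =>
    intro n s
    simp only [List.map_cons, List.foldl_cons]
    have hstep : streamStep (n, some s) (HintItem.puzzle p)
        = if 38 < s + 1 then (n + 1, some 1) else (n, some (s + 1)) := by
      simp [streamStep, hintSlotCost, hintIsSection]
    rw [hstep]
    by_cases h : 38 < s + 1
    · simp only [if_pos h]; exact ih (n + 1) 1
    · simp only [if_neg h]; exact ih n (s + 1)

theorem alt_eq (puzzles : List (List (String × String))) :
    count_hint_pages_alt puzzles
      = (pvDiffOrder.foldl (fun st d => List.foldl streamStep st (seg puzzles (pvLabels.getD d "") d))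
          ((0 : Int), (none : Option Int))).1 := by
  unfold count_hint_pages_alt
  congr 2
  funext st d
  unfold seg
  by_cases h : puzzles.filter (fun p => pvGet p "difficulty" "medium" == d) = []
  · simp [h]
  · obtain ⟨n, o⟩ := st
    cases o with
    | none =>
      rw [if_neg h, if_neg h]
      simp only [List.foldl_cons]
      have hsec : streamStep ((n : Int), (none : Option Int))
          (HintItem.sec (pvLabels.getD d "")
            (((puzzles.filter (fun p => pvGet p "difficulty" "medium" == d)).length : Int)) d)
          = (n + 1, some 2) := by
        simp [streamStep, hintSlotCost]
      rw [hsec, stream_puzzles]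
      norm_num
    | some s =>
      rw [if_neg h, if_neg h]
      simp only [List.foldl_cons]
      have hsec : streamStep ((n : Int), some s)
          (HintItem.sec (pvLabels.getD d "")
            (((puzzles.filter (fun p => pvGet p "difficulty" "medium" == d)).length : Int)) d)
          = if 38 < s + 3 then (n + 1, some 2) else (n, some (s + 2)) := by
        simp only [streamStep, hintSlotCost, hintIsSection, true_and]
        split_ifs <;> first | rfl | omega
      rw [hsec]
      by_cases h3 : 38 < s + 3
      · rw [if_pos h3, if_pos h3, stream_puzzles]
        norm_num
      · rw [if_neg h3, if_neg h3, stream_puzzles]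

theorem foldl_stream_flatMap (F : String → List HintItem) :
    ∀ (L : List String) (st : Int × Option Int),
    List.foldl streamStep st (L.flatMap F)
      = L.foldl (fun st d => List.foldl streamStep st (F d)) st := by
  intro L
  induction L with
  | nil => intro st; simp
  | cons d L ih =>
    intro st
    simp only [List.flatMap_cons, List.foldl_append, List.foldl_cons]
    exact ih _

-- ===== VERDICT (by name: the statement is the Claim_ definition above) =====
theorem count_hint_pages_spec : Claim_equal_count_hint_pages := by
  intro puzzles _
  unfold Spec_count_hint_pages
  unfold count_hint_pages
  have h1 := stream_none (hintItems puzzles) 0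
  rw [zero_add] at h1
  rw [← h1, hintItems_eq, foldl_stream_flatMap, alt_eq]
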